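-- pv_equiv track=rewrite | github.com/G1OJS/BandOpticon | python/refreshing_all_plot.py | merge_ab
-- ===== SOURCE A (Python) =====
-- def merge_ab(decodes_by_call_a, decodes_by_call_b):
--     records = []
--
--     for call in sorted(set(decodes_by_call_a) | set(decodes_by_call_b)):
--         # 0 = A, 1 = B
--         for sn_index, dataset in enumerate((decodes_by_call_a, decodes_by_call_b)):
--             if call not in dataset:
--                 continue
--             for rec in dataset[call]:
--                 sn = rec['SN']
--                 rec.update({'sn_a':None, 'sn_b':None})
--                 rec.pop('SN')
--                 snkey=['sn_a','sn_b'][sn_index]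
--                 rec[snkey]=sn
--                 records.append(rec)
--
--     return records
-- ===== SOURCE B (Python) =====
-- def merge_ab(decodes_by_call_a, decodes_by_call_b):
--     # Flatten both datasets into (call, rec) pairs, then one stable sort by call.
--     tagged = []
--     for snkey, dataset in (('sn_a', decodes_by_call_a), ('sn_b', decodes_by_call_b)):
--         for call, recs in dataset.items():
--             for rec in recs:
--                 sn = rec.pop('SN')
--                 rec['sn_a'] = None
--                 rec['sn_b'] = None
--                 rec[snkey] = sn
--                 tagged.append((call, rec))
--     tagged.sort(key=lambda t: t[0])
--     return [rec for _, rec in tagged]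
-- ===== Notes on version B (the rewrite author's own statement) =====
-- stated objective: alternative
-- what changed: Instead of sorting the union of the two key sets and looking each call up in both dicts, B flattens both dicts once into side-tagged (call, record) pairs and does a single stable sort keyed on the call, relying on stability to keep A-side records before B-side records within each call.
import Mathlib
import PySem

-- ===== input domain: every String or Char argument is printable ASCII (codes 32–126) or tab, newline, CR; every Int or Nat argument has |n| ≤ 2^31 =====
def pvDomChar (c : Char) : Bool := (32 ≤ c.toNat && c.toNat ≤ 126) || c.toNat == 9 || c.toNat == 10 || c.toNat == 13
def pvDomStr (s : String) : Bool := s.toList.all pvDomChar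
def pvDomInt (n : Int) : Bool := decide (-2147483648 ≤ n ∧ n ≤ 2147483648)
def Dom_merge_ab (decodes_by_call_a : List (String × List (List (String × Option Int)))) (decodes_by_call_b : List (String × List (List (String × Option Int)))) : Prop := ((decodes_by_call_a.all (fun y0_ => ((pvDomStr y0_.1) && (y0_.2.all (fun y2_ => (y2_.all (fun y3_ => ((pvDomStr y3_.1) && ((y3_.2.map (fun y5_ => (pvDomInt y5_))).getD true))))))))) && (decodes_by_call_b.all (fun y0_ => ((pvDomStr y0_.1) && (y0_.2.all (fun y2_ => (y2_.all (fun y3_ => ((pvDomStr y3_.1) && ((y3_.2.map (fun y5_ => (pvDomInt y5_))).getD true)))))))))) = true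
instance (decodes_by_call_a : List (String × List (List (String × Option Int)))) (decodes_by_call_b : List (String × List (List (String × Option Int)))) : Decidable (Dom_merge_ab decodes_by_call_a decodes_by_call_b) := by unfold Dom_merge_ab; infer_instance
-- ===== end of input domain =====

-- B flattens both dicts into side-tagged (call, record) pairs and does ONE stable sort by call,
-- instead of A's sort-the-key-union-then-look-each-call-up strategy. Both programs mutate the
-- record dicts in place in the same way; the equivalence proved here is about the return value.

-- ===== PORT A =====
-- A's per-record mutation: sn = rec['SN']; rec.update({'sn_a':None,'sn_b':None}); rec.pop('SN'); rec[snkey] = sn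
-- (rec['SN'] raises KeyError when 'SN' is absent — excluded by Pre_; the total getD is used under that Pre_)
def pvStepA (rec : PySem.Dict String (Option Int)) (snkey : String) : PySem.Dict String (Option Int) :=
  let sn := rec.getD "SN" none
  let rec1 := (rec.insert "sn_a" none).insert "sn_b" none
  let rec2 := rec1.erase "SN"
  rec2.insert snkey sn

def merge_ab (decodes_by_call_a : List (String × List (List (String × Option Int)))) (decodes_by_call_b : List (String × List (List (String × Option Int)))) : List (List (String × Option Int)) :=
  let A := PySem.Dict.ofList decodes_by_call_a
  let B := PySem.Dict.ofList decodes_by_call_b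
  -- for call in sorted(set(A) | set(B)): …, with the two-element enumerate unrolled (side 0 = A/'sn_a', side 1 = B/'sn_b')
  (PySem.List.sorted (PySem.Set.union (PySem.Set.ofList A.keys) (PySem.Set.ofList B.keys)) (fun c => c) false).foldl
    (fun records call =>
      let records1 := if A.contains call then records ++ (A.getD call []).map (fun r => (pvStepA (PySem.Dict.ofList r) "sn_a").items) else records
      if B.contains call then records1 ++ (B.getD call []).map (fun r => (pvStepA (PySem.Dict.ofList r) "sn_b").items) else records1) []

-- ===== PORT B =====
-- B's per-record mutation: sn = rec.pop('SN'); rec['sn_a'] = None; rec['sn_b'] = None; rec[snkey] = sn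
-- (rec.pop('SN') raises KeyError when 'SN' is absent — excluded by Pre_; the total getD is used under that Pre_)
def pvStepB (rec : PySem.Dict String (Option Int)) (snkey : String) : PySem.Dict String (Option Int) :=
  let sn := rec.getD "SN" none
  let rec1 := rec.erase "SN"
  let rec2 := (rec1.insert "sn_a" none).insert "sn_b" none
  rec2.insert snkey sn

def merge_ab_alt (decodes_by_call_a : List (String × List (List (String × Option Int)))) (decodes_by_call_b : List (String × List (List (String × Option Int)))) : List (List (String × Option Int)) :=
  let A := PySem.Dict.ofList decodes_by_call_a
  let B := PySem.Dict.ofList decodes_by_call_b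
  -- the ('sn_a', A), ('sn_b', B) loop unrolled; the inner loops append (call, rec) pairs; then one stable sort by call
  let tagged := A.items.foldl (fun acc p => acc ++ p.2.map (fun r => (p.1, (pvStepB (PySem.Dict.ofList r) "sn_a").items))) []
  let tagged := B.items.foldl (fun acc p => acc ++ p.2.map (fun r => (p.1, (pvStepB (PySem.Dict.ofList r) "sn_b").items))) tagged
  (PySem.List.sorted tagged (fun t => t.1) false).map (fun t => t.2)

-- ===== PRECONDITION & SPEC =====
-- Pre_ excludes exactly the inputs on which the Python A raises KeyError: a record without an 'SN'
-- key (B raises KeyError on those too, at rec.pop('SN')).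
def Pre_merge_ab (decodes_by_call_a : List (String × List (List (String × Option Int)))) (decodes_by_call_b : List (String × List (List (String × Option Int)))) : Prop :=
  ((decodes_by_call_a.all (fun p => p.2.all (fun r => r.any (fun q => q.1 == "SN")))) &&
   (decodes_by_call_b.all (fun p => p.2.all (fun r => r.any (fun q => q.1 == "SN"))))) = true
instance (decodes_by_call_a : List (String × List (List (String × Option Int)))) (decodes_by_call_b : List (String × List (List (String × Option Int)))) : Decidable (Pre_merge_ab decodes_by_call_a decodes_by_call_b) := by unfold Pre_merge_ab; infer_instance

def pvWitness_merge_ab : (List (String × List (List (String × Option Int)))) × (List (String × List (List (String × Option Int)))) :=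
  ([("k1", [[("SN", some 3), ("x", none)]])], [("k0", [[("SN", none)]])])

def Spec_merge_ab (decodes_by_call_a : List (String × List (List (String × Option Int)))) (decodes_by_call_b : List (String × List (List (String × Option Int)))) (out : List (List (String × Option Int))) : Prop := out = merge_ab_alt decodes_by_call_a decodes_by_call_b
instance (decodes_by_call_a : List (String × List (List (String × Option Int)))) (decodes_by_call_b : List (String × List (List (String × Option Int)))) (out : List (List (String × Option Int))) : Decidable (Spec_merge_ab decodes_by_call_a decodes_by_call_b out) := by unfold Spec_merge_ab; infer_instance

-- ===== CLAIM (what is proved, stated in full; the proofs are below) =====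
def Claim_equal_merge_ab : Prop := ∀ (decodes_by_call_a : List (String × List (List (String × Option Int)))) (decodes_by_call_b : List (String × List (List (String × Option Int)))), Dom_merge_ab decodes_by_call_a decodes_by_call_b → Pre_merge_ab decodes_by_call_a decodes_by_call_b → Spec_merge_ab decodes_by_call_a decodes_by_call_b (merge_ab decodes_by_call_a decodes_by_call_b)

-- ===== LEMMAS AND PROOFS =====

-- erasing one key commutes with inserting a different key
theorem pv_erase_insert_comm {ν : Type} (d : PySem.Dict String ν) (k k' : String) (v : ν)
    (h : k ≠ k') : (d.insert k v).erase k' = (d.erase k').insert k v := by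
  have hany : ∀ l : List (String × ν),
      (l.filter (fun p => !(p.1 == k'))).any (fun p => p.1 == k) = l.any (fun p => p.1 == k) := by
    intro l
    rw [List.any_filter]
    refine List.any_congr rfl ?_
    intro p
    by_cases hk : p.1 = k
    · subst hk
      simp only [beq_self_eq_true, Bool.and_true]
      simp [h]
    · simp [hk]
  simp only [PySem.Dict.insert, PySem.Dict.erase, PySem.Dict.contains]
  by_cases hc : d.items.any (fun p => p.1 == k) = true
  · simp only [hc, hany d.items, if_pos]
    congr 1
    rw [List.filter_map]
    congr 1
    apply List.filter_congr
    intro p _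
    by_cases hk : p.1 = k
    · simp [hk]
    · simp [hk]
  · simp only [hc, hany d.items]
    simp only [Bool.false_eq_true, if_false]
    congr 1
    rw [List.filter_append]
    simp [h]

-- the two per-record mutations produce the same dict (same items in the same order)
theorem pv_step_eq : pvStepA = pvStepB := by
  funext rec snkey
  unfold pvStepA pvStepB
  dsimp only []
  rw [pv_erase_insert_comm _ _ _ _ (by decide), pv_erase_insert_comm _ _ _ _ (by decide)]

theorem pv_insertBy_skip {α : Type} (before : α → α → Bool) (x : α) (l1 l2 : List α)
    (h : ∀ y ∈ l1, before x y = false) :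
    PySem.List.insertBy before x (l1 ++ l2) = l1 ++ PySem.List.insertBy before x l2 := by
  induction l1 with
  | nil => simp
  | cons y ys ih =>
    simp only [List.cons_append, PySem.List.insertBy, h y (by simp)]
    simp only [Bool.false_eq_true, if_false, List.cons.injEq, true_and]
    exact ih (fun z hz => h z (by simp [hz]))

theorem pv_insertBy_front {α : Type} (before : α → α → Bool) (x : α) (l : List α)
    (h : ∀ y ∈ l, before x y = true) :
    PySem.List.insertBy before x l = x :: l := by
  cases l with
  | nil => rfl
  | cons y ys => simp [PySem.List.insertBy, h y (by simp)]

-- inserting x into the block decomposition puts it at the end of its key's block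
theorem pv_insert_into_blocks {α : Type} (x : String × α) (ks : List String) (xs : List (String × α))
    (hks : ks.Pairwise (· < ·)) (hmem : x.1 ∈ ks) :
    PySem.List.insertBy (fun a b => decide (a.1 < b.1)) x
        (ks.flatMap (fun k => xs.filter (fun t => t.1 == k)))
      = ks.flatMap (fun k => (xs ++ [x]).filter (fun t => t.1 == k)) := by
  induction ks with
  | nil => simp at hmem
  | cons k ks' ih =>
    have hlt : ∀ k' ∈ ks', k < k' := (List.pairwise_cons.mp hks).1
    by_cases hx : x.1 = k
    · have hrest : ∀ y ∈ ks'.flatMap (fun k => xs.filter (fun t => t.1 == k)),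
          (fun a b => decide (a.1 < b.1)) x y = true := by
        intro y hy
        simp only [List.mem_flatMap, List.mem_filter] at hy
        obtain ⟨k', hk', _, hyk⟩ := hy
        have : y.1 = k' := by simpa using hyk
        simp [this, hx, hlt k' hk']
      have hblock : ∀ y ∈ xs.filter (fun t => t.1 == k),
          (fun a b => decide (a.1 < b.1)) x y = false := by
        intro y hy
        simp only [List.mem_filter] at hy
        have : y.1 = k := by simpa using hy.2
        simp [this, hx]
      rw [List.flatMap_cons, pv_insertBy_skip _ _ _ _ hblock,
        pv_insertBy_front _ _ _ hrest, List.flatMap_cons]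
      have h1 : (xs ++ [x]).filter (fun t => t.1 == k) = xs.filter (fun t => t.1 == k) ++ [x] := by
        simp [List.filter_append, hx]
      have h2 : ks'.flatMap (fun k => (xs ++ [x]).filter (fun t => t.1 == k))
          = ks'.flatMap (fun k => xs.filter (fun t => t.1 == k)) := by
        apply List.flatMap_congr
        intro k' hk'
        have : x.1 ≠ k' := by rw [hx]; exact ne_of_lt (hlt k' hk')
        simp [List.filter_append, this]
      rw [h1, h2]
      simp
    · have hx' : x.1 ∈ ks' := by
        cases List.mem_cons.mp hmem with
        | inl h => exact absurd h hx
        | inr h => exact h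
      have hblock : ∀ y ∈ xs.filter (fun t => t.1 == k),
          (fun a b => decide (a.1 < b.1)) x y = false := by
        intro y hy
        simp only [List.mem_filter] at hy
        have hyk : y.1 = k := by simpa using hy.2
        have : k < x.1 := hlt _ hx'
        simp [hyk, not_lt_of_gt this]
      rw [List.flatMap_cons, pv_insertBy_skip _ _ _ _ hblock, ih (List.pairwise_cons.mp hks).2 hx',
        List.flatMap_cons]
      have h1 : (xs ++ [x]).filter (fun t => t.1 == k) = xs.filter (fun t => t.1 == k) := by
        simp [List.filter_append, hx]
      rw [h1]

-- Python's stable sort keyed on the first component = the blocks of a strictly increasing,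
-- covering key list, each block in input order
theorem pv_sorted_fst_blocks {α : Type} (xs : List (String × α)) (ks : List String)
    (hks : ks.Pairwise (· < ·)) (hcover : ∀ p ∈ xs, p.1 ∈ ks) :
    PySem.List.sorted xs (fun t => t.1) false
      = ks.flatMap (fun k => xs.filter (fun t => t.1 == k)) := by
  induction xs using List.reverseRecOn with
  | nil => simp [PySem.List.sorted]
  | append_singleton xs x ih =>
    rw [PySem.List.sorted_eq_foldl_insertBy, List.foldl_append]
    simp only [List.foldl_cons, List.foldl_nil]
    rw [← PySem.List.sorted_eq_foldl_insertBy,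
      ih (fun p hp => hcover p (by simp [hp]))]
    exact pv_insert_into_blocks x ks xs hks (hcover x (by simp))

-- a key-indexed flatMap over a nodup-key association list collapses to one dict lookup
theorem pv_flatMap_key {β γ : Type} (l : List (String × List β)) (hnd : (l.map Prod.fst).Nodup)
    (c : String) (e : β → γ) :
    l.flatMap (fun q => if q.1 = c then q.2.map e else [])
      = ((PySem.Dict.mk l).getD c []).map e := by
  induction l with
  | nil => simp [PySem.Dict.getD, PySem.Dict.get?]
  | cons q t ih =>
    simp only [List.map_cons, List.nodup_cons] at hnd
    rw [List.flatMap_cons]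
    by_cases hq : q.1 = c
    · have ht : t.flatMap (fun q => if q.1 = c then q.2.map e else []) = [] := by
        rw [List.flatMap_eq_nil_iff]
        intro p hp
        have : p.1 ≠ c := by
          intro hc; exact hnd.1 (by rw [← hc] at hq; rw [hq]; exact List.mem_map_of_mem hp)
        simp [this]
      have : (PySem.Dict.mk (q :: t)).getD c [] = q.2 := by
        simp [PySem.Dict.getD, PySem.Dict.get?, hq]
      simp [hq, ht, this]
    · have : (PySem.Dict.mk (q :: t)).getD c [] = (PySem.Dict.mk t).getD c [] := by
        simp [PySem.Dict.getD, PySem.Dict.get?, hq]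
      simp only [hq, if_false, List.nil_append, this]
      exact ih hnd.2

-- one side of the tagged list: filter by call then untag = that side's dict lookup
theorem pv_side (d : PySem.Dict String (List (List (String × Option Int)))) (hnd : d.keys.Nodup)
    (c snkey : String) :
    ((d.items.flatMap (fun p => p.2.map (fun r => (p.1, (pvStepB (PySem.Dict.ofList r) snkey).items)))).filter
        (fun t => t.1 == c)).map (fun t => t.2)
      = (d.getD c []).map (fun r => (pvStepB (PySem.Dict.ofList r) snkey).items) := by
  rw [List.filter_flatMap, List.map_flatMap]
  have h1 : ∀ p ∈ d.items,
      ((p.2.map (fun r => (p.1, (pvStepB (PySem.Dict.ofList r) snkey).items))).filter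
          (fun t => t.1 == c)).map (fun t => t.2)
        = if p.1 = c then p.2.map (fun r => (pvStepB (PySem.Dict.ofList r) snkey).items) else [] := by
    intro p _
    by_cases hp : p.1 = c
    · rw [if_pos hp, List.filter_map]
      have : ∀ r ∈ p.2, ((fun t => t.1 == c) ∘ (fun r => (p.1, (pvStepB (PySem.Dict.ofList r) snkey).items))) r = true := by
        intro r _; simp [hp]
      rw [List.filter_eq_self.mpr this, List.map_map]
      rfl
    · rw [if_neg hp]
      have : ∀ t ∈ p.2.map (fun r => (p.1, (pvStepB (PySem.Dict.ofList r) snkey).items)), ¬ ((fun t => t.1 == c) t = true) := by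
        intro t ht
        simp only [List.mem_map] at ht
        obtain ⟨r, _, rfl⟩ := ht
        simp [hp]
      rw [List.filter_eq_nil_iff.mpr this, List.map_nil]
  rw [List.flatMap_congr h1]
  exact pv_flatMap_key d.items hnd c _

theorem pv_main : ∀ da db, merge_ab da db = merge_ab_alt da db := by
  intro da db
  unfold merge_ab merge_ab_alt
  dsimp only []
  rw [pv_step_eq]
  set A := PySem.Dict.ofList da with hA
  set B := PySem.Dict.ofList db with hB
  set calls := PySem.List.sorted (PySem.Set.union (PySem.Set.ofList A.keys) (PySem.Set.ofList B.keys)) (fun c => c) false with hcalls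
  -- A's fold over the sorted key union is a flatMap over calls
  have hbody : (fun (records : List (List (String × Option Int))) call =>
      let records1 := if A.contains call then records ++ (A.getD call []).map (fun r => (pvStepB (PySem.Dict.ofList r) "sn_a").items) else records
      if B.contains call then records1 ++ (B.getD call []).map (fun r => (pvStepB (PySem.Dict.ofList r) "sn_b").items) else records1)
      = fun records call => records ++ ((A.getD call []).map (fun r => (pvStepB (PySem.Dict.ofList r) "sn_a").items)
          ++ (B.getD call []).map (fun r => (pvStepB (PySem.Dict.ofList r) "sn_b").items)) := by
    funext records call
    by_cases ha : A.contains call = true <;> by_cases hb : B.contains call = true <;>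
      simp [ha, hb, PySem.Dict.getD_of_not_contains, List.append_assoc]
  rw [hbody, PySem.List.foldl_append_eq_flatMap, List.nil_append]
  -- B's two folds build the tagged list
  rw [PySem.List.foldl_append_eq_flatMap, PySem.List.foldl_append_eq_flatMap, List.nil_append]
  set tagged := A.items.flatMap (fun p => p.2.map (fun r => (p.1, (pvStepB (PySem.Dict.ofList r) "sn_a").items)))
      ++ B.items.flatMap (fun p => p.2.map (fun r => (p.1, (pvStepB (PySem.Dict.ofList r) "sn_b").items))) with htagged
  -- calls is strictly increasing and covers tagged's keys
  have hndU : (PySem.Set.union (PySem.Set.ofList A.keys) (PySem.Set.ofList B.keys)).Nodup :=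
    PySem.Set.nodup_union _ _ (PySem.Set.nodup_ofList _)
  have hndC : calls.Nodup := ((PySem.List.sorted_perm _ _ _).symm.nodup hndU)
  have hle : calls.Pairwise (fun a b => a ≤ b) := PySem.List.sorted_pairwise _ (fun c => c)
  have hks : calls.Pairwise (· < ·) := (hle.and hndC).imp (fun h => lt_of_le_of_ne h.1 h.2)
  have hcover : ∀ p ∈ tagged, p.1 ∈ calls := by
    intro p hp
    rw [hcalls, PySem.List.mem_sorted, PySem.Set.mem_union, PySem.Set.mem_ofList, PySem.Set.mem_ofList]
    rw [htagged, List.mem_append] at hp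
    cases hp with
    | inl h =>
      left
      simp only [List.mem_flatMap, List.mem_map] at h
      obtain ⟨q, hq, r, _, rfl⟩ := h
      exact List.mem_map_of_mem hq
    | inr h =>
      right
      simp only [List.mem_flatMap, List.mem_map] at h
      obtain ⟨q, hq, r, _, rfl⟩ := h
      exact List.mem_map_of_mem hq
  -- stable sort = sorted-call blocks; each block = A-side records then B-side records of that call
  rw [pv_sorted_fst_blocks tagged calls hks hcover, List.map_flatMap]
  apply List.flatMap_congr
  intro c _
  rw [htagged, List.filter_append, List.map_append,
    pv_side A (PySem.Dict.nodup_keys_ofList da) c "sn_a",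
    pv_side B (PySem.Dict.nodup_keys_ofList db) c "sn_b"]

-- ===== VERDICT (by name: the statement is the Claim_ definition above) =====
theorem merge_ab_spec : Claim_equal_merge_ab := by
  intro da db _ _
  show merge_ab da db = merge_ab_alt da db
  exact pv_main da db
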